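-- pv_equiv track=rewrite | github.com/wu-sheng1997/the-Automatic-Bucket-Filling- | utils.py | initialize_Q
-- ===== SOURCE A (Python) =====
-- def set_dict(target_dict,key,value):
--     target_dict[key]=value
--
-- def initialize_Q(number_s_a):
--     Q={}
--     for key in number_s_a.keys():
--         keyy=key.split('->')
--         name_s=str(keyy[0])
--         name_a=str(keyy[1])
--         p={}
--         try:
--             set_dict(Q[name_s],name_a,0)
--         except:
--             set_dict(p,name_a,0)
--             set_dict(Q,name_s,p)
--     return Q
-- ===== SOURCE B (Python) =====
-- def initialize_Q(number_s_a):
--     groups = {}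
--     for key in number_s_a.keys():
--         parts = key.split('->')
--         groups.setdefault(parts[0], []).append(parts[1])
--     return {s: {a: 0 for a in acts} for s, acts in groups.items()}
-- ===== Notes on version B (the rewrite author's own statement) =====
-- stated objective: simpler
-- what changed: Replaces the fused try/except in-place nested-dict mutation with two clean passes: first group action names by state via setdefault, then build the nested zero dict with a comprehension.
import Mathlib
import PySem

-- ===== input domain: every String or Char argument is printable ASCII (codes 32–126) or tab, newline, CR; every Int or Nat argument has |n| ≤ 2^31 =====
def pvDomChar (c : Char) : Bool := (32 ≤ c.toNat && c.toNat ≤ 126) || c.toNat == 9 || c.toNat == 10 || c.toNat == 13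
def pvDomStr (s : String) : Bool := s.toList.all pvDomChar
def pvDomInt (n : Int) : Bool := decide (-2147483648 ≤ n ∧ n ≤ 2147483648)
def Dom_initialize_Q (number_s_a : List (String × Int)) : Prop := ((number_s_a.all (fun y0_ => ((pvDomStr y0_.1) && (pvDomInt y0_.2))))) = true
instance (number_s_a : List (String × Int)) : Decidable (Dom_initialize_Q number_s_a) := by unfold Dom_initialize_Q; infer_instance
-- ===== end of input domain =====

-- B replaces A's fused try/except in-place nested-dict mutation by two passes (group actions
-- by state, then build the nested zero dict); same cost, simpler decomposition.


-- ===== PORT A =====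
def initialize_Q (number_s_a : List (String × Int)) : List (String × List (String × Int)) :=
  (number_s_a.foldl
    (fun (Q : PySem.Dict String (PySem.Dict String Int)) kv =>
      match (PySem.Str.split? kv.1 "->").getD [] with
      | name_s :: name_a :: _ =>
        match Q.get? name_s with
        | some inner => Q.insert name_s (inner.insert name_a 0)   -- set_dict(Q[name_s], name_a, 0): inner dict mutated in place
        | none => Q.insert name_s (PySem.Dict.empty.insert name_a 0)   -- except: p = {}; p[name_a] = 0; Q[name_s] = p
      | _ => Q)   -- keyy[1] raises IndexError; excluded by Pre_
    PySem.Dict.empty).items.map (fun p => (p.1, p.2.items))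

-- ===== PORT B =====
def initialize_Q_alt (number_s_a : List (String × Int)) : List (String × List (String × Int)) :=
  (number_s_a.foldl
    (fun (g : PySem.Dict String (List String)) kv =>
      let parts := (PySem.Str.split? kv.1 "->").getD []
      match PySem.List.pyGet? parts 0, PySem.List.pyGet? parts 1 with
      | some s, some a => g.modify s [] (· ++ [a])   -- groups.setdefault(parts[0], []).append(parts[1])
      | _, _ => g)   -- parts[1] raises IndexError; excluded by Pre_
    PySem.Dict.empty).items.map
      (fun p => (p.1, (p.2.foldl (fun (d : PySem.Dict String Int) a => d.insert a 0) PySem.Dict.empty).items))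

-- ===== PRECONDITION & SPEC =====
-- Pre_ excludes exactly the inputs where A RAISES: a key without '->' makes keyy[1] an
-- IndexError in A (B raises the same way on parts[1]).
def Pre_initialize_Q (number_s_a : List (String × Int)) : Prop :=
  ∀ kv ∈ number_s_a, 2 ≤ ((PySem.Str.split? kv.1 "->").getD []).length
instance (number_s_a : List (String × Int)) : Decidable (Pre_initialize_Q number_s_a) := by unfold Pre_initialize_Q; infer_instance
def pvWitness_initialize_Q : (List (String × Int)) := [("s1->a1", 3), ("s2->a1", 4), ("s1->a2", 5)]
def Spec_initialize_Q (number_s_a : List (String × Int)) (out : List (String × List (String × Int))) : Prop := out = initialize_Q_alt number_s_a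
instance (number_s_a : List (String × Int)) (out : List (String × List (String × Int))) : Decidable (Spec_initialize_Q number_s_a out) := by unfold Spec_initialize_Q; infer_instance

-- ===== CLAIM (what is proved, stated in full; the proofs are below) =====
def Claim_equal_initialize_Q : Prop := ∀ (number_s_a : List (String × Int)), Dom_initialize_Q number_s_a → Pre_initialize_Q number_s_a → Spec_initialize_Q number_s_a (initialize_Q number_s_a)

-- ===== LEMMAS AND PROOFS =====

-- the inner dict {a: 0 for a in acts} that B builds from a group
def pvMk (acts : List String) : PySem.Dict String Int :=
  acts.foldl (fun d a => d.insert a 0) PySem.Dict.empty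

-- B's groups dict, value-wise mapped through pvMk, viewed as A's nested dict
def pvLift (g : PySem.Dict String (List String)) : PySem.Dict String (PySem.Dict String Int) :=
  ⟨g.items.map (fun p => (p.1, pvMk p.2))⟩

lemma pvLift_get? (g : PySem.Dict String (List String)) (k : String) :
    (pvLift g).get? k = (g.get? k).map pvMk := by
  simp [pvLift, PySem.Dict.get?, List.find?_map, Function.comp_def]

lemma pvLift_contains (g : PySem.Dict String (List String)) (k : String) :
    (pvLift g).contains k = g.contains k := by
  simp [pvLift, PySem.Dict.contains, List.any_map, Function.comp_def]

lemma pvLift_insert (g : PySem.Dict String (List String)) (k : String) (v : List String) :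
    pvLift (g.insert k v) = (pvLift g).insert k (pvMk v) := by
  unfold PySem.Dict.insert
  rw [pvLift_contains]
  split_ifs with h
  · simp only [pvLift, List.map_map]
    congr 1
    apply List.map_congr_left
    intro p _
    by_cases hp : p.1 = k <;> simp [hp]
  · simp [pvLift]

lemma pvMk_append (acts : List String) (a : String) :
    pvMk (acts ++ [a]) = (pvMk acts).insert a 0 := by
  simp [pvMk]

lemma pvLoop (l : List (String × Int))
    (h : ∀ kv ∈ l, 2 ≤ ((PySem.Str.split? kv.1 "->").getD []).length)
    (g : PySem.Dict String (List String)) :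
    l.foldl
      (fun (Q : PySem.Dict String (PySem.Dict String Int)) kv =>
        match (PySem.Str.split? kv.1 "->").getD [] with
        | name_s :: name_a :: _ =>
          match Q.get? name_s with
          | some inner => Q.insert name_s (inner.insert name_a 0)
          | none => Q.insert name_s (PySem.Dict.empty.insert name_a 0)
        | _ => Q) (pvLift g)
    = pvLift (l.foldl
        (fun (g : PySem.Dict String (List String)) kv =>
          let parts := (PySem.Str.split? kv.1 "->").getD []
          match PySem.List.pyGet? parts 0, PySem.List.pyGet? parts 1 with
          | some s, some a => g.modify s [] (· ++ [a])
          | _, _ => g) g) := by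
  induction l generalizing g with
  | nil => rfl
  | cons kv t ih =>
    have hkv := h kv (List.mem_cons_self ..)
    obtain ⟨s, a, rest, hsplit⟩ :
        ∃ s a rest, (PySem.Str.split? kv.1 "->").getD [] = s :: a :: rest := by
      rcases hl : (PySem.Str.split? kv.1 "->").getD [] with _ | ⟨s, _ | ⟨a, rest⟩⟩ <;>
        simp_all
    have hstep :
        (match (PySem.Str.split? kv.1 "->").getD [] with
          | name_s :: name_a :: _ =>
            match (pvLift g).get? name_s with
            | some inner => (pvLift g).insert name_s (inner.insert name_a 0)
            | none => (pvLift g).insert name_s (PySem.Dict.empty.insert name_a 0)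
          | _ => (pvLift g))
        = pvLift (let parts := (PySem.Str.split? kv.1 "->").getD []
          match PySem.List.pyGet? parts 0, PySem.List.pyGet? parts 1 with
          | some s, some a => g.modify s [] (· ++ [a])
          | _, _ => g) := by
      rw [hsplit]
      have h0 : PySem.List.pyGet? (s :: a :: rest) 0 = some s := by simp [pysem]
      have h1 : PySem.List.pyGet? (s :: a :: rest) 1 = some a := by simp [pysem]
      simp only [h0, h1]
      simp only [PySem.Dict.modify, pvLift_insert, pvLift_get?]
      rcases hg : g.get? s with _ | acts
      · simp [PySem.Dict.getD, hg]
        rfl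
      · simp [PySem.Dict.getD, hg, pvMk_append]
    simp only [List.foldl_cons, hstep]
    exact ih (fun kv hkv => h kv (List.mem_cons_of_mem _ hkv)) _

-- ===== VERDICT (by name: the statement is the Claim_ definition above) =====
theorem initialize_Q_spec : Claim_equal_initialize_Q := by
  intro l _ hpre
  unfold Spec_initialize_Q initialize_Q initialize_Q_alt
  have h0 : (PySem.Dict.empty : PySem.Dict String (PySem.Dict String Int)) = pvLift PySem.Dict.empty := rfl
  rw [h0, pvLoop l hpre PySem.Dict.empty]
  simp [pvLift, List.map_map, pvMk, Function.comp_def]
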